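-- pv_equiv track=rewrite | github.com/dewy01/dss67 | services/backend/app/helpers/text_parser.py | _pick_delimiter
-- ===== SOURCE A (Python) =====
-- def _pick_delimiter(line: str) -> str:
--     candidates = [
--         (";", ";"),
--         ("\t", "\t"),
--         (" ", "whitespace"),
--     ]
--     best = (0, "whitespace")
--     for token, label in candidates:
--         count = line.count(token)
--         if count > best[0]:
--             best = (count, label)
--     return best[1]
-- ===== SOURCE B (Python) =====
-- def _pick_delimiter(line: str) -> str:
--     # One pass over the characters, then a direct priority decision.
--     semis = tabs = spaces = 0
--     for ch in line:
--         if ch == ";":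
--             semis += 1
--         elif ch == "\t":
--             tabs += 1
--         elif ch == " ":
--             spaces += 1
--     if spaces > max(semis, tabs):
--         return "whitespace"
--     if tabs > semis:
--         return "\t"
--     if semis > 0:
--         return ";"
--     return "whitespace"
-- ===== Notes on version B (the rewrite author's own statement) =====
-- stated objective: alternative
-- what changed: B replaces three separate line.count scans plus a best-so-far tuple loop with one single pass over the characters maintaining three counters, followed by a direct priority decision (spaces strictly dominating both, then tabs over semicolons, then semicolons, else whitespace).
import Mathlib
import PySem

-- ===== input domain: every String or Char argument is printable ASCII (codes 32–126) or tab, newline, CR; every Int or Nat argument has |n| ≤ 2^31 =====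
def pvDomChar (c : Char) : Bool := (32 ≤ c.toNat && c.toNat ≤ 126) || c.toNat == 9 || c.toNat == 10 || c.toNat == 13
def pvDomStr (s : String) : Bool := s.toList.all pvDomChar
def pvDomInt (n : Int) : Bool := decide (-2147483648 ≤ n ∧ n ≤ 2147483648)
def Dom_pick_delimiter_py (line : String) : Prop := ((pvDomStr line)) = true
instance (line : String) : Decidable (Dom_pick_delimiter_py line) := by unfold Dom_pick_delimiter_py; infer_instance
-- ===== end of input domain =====

-- B replaces A's three repeated line.count scans and best-so-far tuple loop with one pass over
-- the characters maintaining three counters plus a direct priority decision (alternative algorithm).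

-- ===== PORT A =====
def pick_delimiter_py (line : String) : String :=
  let candidates : List (String × String) := [(";", ";"), ("\t", "\t"), (" ", "whitespace")]
  let best : Int × String := candidates.foldl
    (fun best tl =>
      let count : Int := (PySem.Str.count line tl.1 : Int)
      if count > best.1 then (count, tl.2) else best)
    ((0 : Int), "whitespace")
  best.2

-- ===== PORT B =====
def pick_delimiter_py_alt (line : String) : String :=
  let c : Int × Int × Int := line.toList.foldl
    (fun st ch =>
      if ch = ';' then (st.1 + 1, st.2.1, st.2.2)
      else if ch = '\t' then (st.1, st.2.1 + 1, st.2.2)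
      else if ch = ' ' then (st.1, st.2.1, st.2.2 + 1)
      else st)
    ((0 : Int), (0 : Int), (0 : Int))
  if c.2.2 > max c.1 c.2.1 then "whitespace"
  else if c.2.1 > c.1 then "\t"
  else if c.1 > 0 then ";"
  else "whitespace"

-- ===== PRECONDITION & SPEC =====
def Spec_pick_delimiter_py (line : String) (out : String) : Prop := out = pick_delimiter_py_alt line
instance (line : String) (out : String) : Decidable (Spec_pick_delimiter_py line out) := by unfold Spec_pick_delimiter_py; infer_instance

-- ===== CLAIM (what is proved, stated in full; the proofs are below) =====
def Claim_equal_pick_delimiter_py : Prop := ∀ (line : String), Dom_pick_delimiter_py line → Spec_pick_delimiter_py line (pick_delimiter_py line)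

-- ===== LEMMAS AND PROOFS =====

-- Python str.count with a single-character pattern is the character count.
theorem chars_count_go_single (c : Char) (fuel : Nat) : ∀ (l : List Char) (acc : Nat),
    l.length ≤ fuel → PySem.Chars.count.go [c] fuel l acc = acc + l.count c := by
  induction fuel with
  | zero =>
      intro l acc h
      cases l with
      | nil => simp [PySem.Chars.count.go]
      | cons hd tl => simp at h
  | succ n ih =>
      intro l acc h
      cases l with
      | nil => simp [PySem.Chars.count.go]
      | cons hd tl =>
          simp only [List.length_cons] at h
          have step : PySem.Chars.count.go [c] (n + 1) (hd :: tl) acc =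
              if [c].isPrefixOf (hd :: tl) then
                PySem.Chars.count.go [c] n (List.drop [c].length (hd :: tl)) (acc + 1)
              else PySem.Chars.count.go [c] n tl acc := rfl
          rw [step]
          by_cases hc : hd = c
          · subst hc
            rw [if_pos (by simp [List.isPrefixOf])]
            simp only [List.length_singleton, List.drop_succ_cons, List.drop_zero]
            rw [ih tl (acc + 1) (by omega)]
            simp [List.count_cons]
            omega
          · rw [if_neg (by simp [List.isPrefixOf]; first | exact hc | exact fun h => hc h.symm)]
            rw [ih tl acc (by omega)]
            simp [List.count_cons, hc, Ne.symm hc]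

theorem chars_count_single (c : Char) (l : List Char) :
    PySem.Chars.count l [c] = l.count c := by
  have h := chars_count_go_single c l.length l 0 (le_refl _)
  simp only [PySem.Chars.count, List.isEmpty, if_false, Nat.zero_add] at h ⊢
  exact h

-- B's one-pass fold computes the three character counts.
theorem alt_fold_counts (l : List Char) (a b d : Int) :
    l.foldl
      (fun (st : Int × Int × Int) ch =>
        if ch = ';' then (st.1 + 1, st.2.1, st.2.2)
        else if ch = '\t' then (st.1, st.2.1 + 1, st.2.2)
        else if ch = ' ' then (st.1, st.2.1, st.2.2 + 1)
        else st)
      (a, b, d)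
    = (a + l.count ';', b + l.count '\t', d + l.count ' ') := by
  induction l generalizing a b d with
  | nil => simp
  | cons hd tl ih =>
      by_cases h1 : hd = ';'
      · subst h1; simp [List.foldl_cons, ih, List.count_cons]; omega
      · by_cases h2 : hd = '\t'
        · subst h2; simp [List.foldl_cons, h1, ih, List.count_cons]; omega
        · by_cases h3 : hd = ' '
          · subst h3; simp [List.foldl_cons, h1, h2, ih, List.count_cons]; omega
          · simp [List.foldl_cons, h1, h2, h3, ih, List.count_cons]

-- ===== VERDICT (by name: the statement is the Claim_ definition above) =====
theorem pick_delimiter_py_spec : Claim_equal_pick_delimiter_py := by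
  intro line _
  unfold Spec_pick_delimiter_py pick_delimiter_py pick_delimiter_py_alt
  have hsemi : (";" : String).toList = [';'] := rfl
  have htab : ("\t" : String).toList = ['\t'] := rfl
  have hsp : (" " : String).toList = [' '] := rfl
  simp only [List.foldl_cons, List.foldl_nil, PySem.Str.count_eq, hsemi, htab, hsp,
    chars_count_single, alt_fold_counts]
  set s : Int := (line.toList.count ';' : Int) with hs
  set t : Int := (line.toList.count '\t' : Int) with ht
  set sp : Int := (line.toList.count ' ' : Int) with hsp'
  have hs0 : 0 ≤ s := by positivity
  have ht0 : 0 ≤ t := by positivity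
  simp only [zero_add, Prod.fst, Prod.snd]
  split_ifs <;> first | rfl | (exfalso; omega)
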